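-- pv_equiv track=rewrite | github.com/EliahKagan/old-practice-snapshot | main/counting-valleys/counting-valleys.py | count_valleys
-- ===== SOURCE A (Python) =====
-- def count_valleys(trek):
--     level = count = 0
--
--     for step in trek:
--         if step == 'U':
--             level += 1
--             if level == 0:
--                 count += 1
--         elif step == 'D':
--             level -= 1
--         else:
--             raise ValueError('unrecognized step')
--
--     return count
-- ===== SOURCE B (Python) =====
-- def count_valleys(trek):
--     # Pass 1: validate and build the altitude profile (running level after each step).
--     profile = []
--     level = 0
--     for step in trek:
--         if step not in ('U', 'D'):
--             raise ValueError('unrecognized step')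
--         level += 1 if step == 'U' else -1
--         profile.append(level)
--     # Pass 2: a valley ends where the trek climbs from -1 back to sea level.
--     return sum(1 for prev, cur in zip([0] + profile, profile)
--                if prev == -1 and cur == 0)
-- ===== Notes on version B (the rewrite author's own statement) =====
-- stated objective: alternative
-- what changed: B replaces A's single stateful loop with two passes: it first builds an altitude profile of running levels, then counts adjacent pairs (prev, cur) with prev == -1 and cur == 0 by zipping the profile with its shifted self.
import Mathlib
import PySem

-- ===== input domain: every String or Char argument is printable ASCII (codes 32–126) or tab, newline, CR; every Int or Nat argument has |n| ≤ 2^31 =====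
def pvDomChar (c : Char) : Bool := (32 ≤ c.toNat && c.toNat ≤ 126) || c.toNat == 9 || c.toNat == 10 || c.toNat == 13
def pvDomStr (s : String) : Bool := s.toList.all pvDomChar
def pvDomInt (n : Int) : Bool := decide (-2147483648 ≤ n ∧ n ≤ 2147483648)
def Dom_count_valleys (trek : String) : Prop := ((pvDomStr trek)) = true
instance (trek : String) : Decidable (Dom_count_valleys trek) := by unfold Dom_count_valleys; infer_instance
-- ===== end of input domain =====

-- B builds an explicit altitude profile and counts (-1 → 0) adjacent pairs instead of A's single stateful loop; objective: alternative decomposition.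

-- ===== PORT A =====
-- A's loop over the trek with state (level, count); the 'else: raise ValueError' branch
-- is excluded by Pre_count_valleys (there the Python raises, so no value is claimed).
def pvStepA (s : Int × Int) (step : Char) : Int × Int :=
  if step = 'U' then
    let level := s.1 + 1
    (level, if level = 0 then s.2 + 1 else s.2)
  else
    (s.1 - 1, s.2)

def count_valleys (trek : String) : Int :=
  (trek.toList.foldl pvStepA ((0 : Int), (0 : Int))).2

-- ===== PORT B =====
-- Pass 1 of Source B: build the profile of running levels (the 'raise' branch is excluded by Pre_).
-- Pass 2 of Source B: zip [0]+profile with profile and count pairs (prev, cur) = (-1, 0).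
def count_valleys_alt (trek : String) : Int :=
  let profile :=
    (trek.toList.foldl (fun (acc : List Int × Int) step =>
        let lv := acc.2 + (if step = 'U' then 1 else -1)
        (acc.1 ++ [lv], lv)) (([] : List Int), (0 : Int))).1
  ((((0 : Int) :: profile).zip profile).filter
      (fun p => p.1 == (-1 : Int) && p.2 == (0 : Int))).length

-- ===== PRECONDITION & SPEC =====
-- Pre_ excludes exactly the treks containing a step other than 'U'/'D': there both Pythons raise ValueError.
def Pre_count_valleys (trek : String) : Prop :=
  trek.toList.all (fun c => c == 'U' || c == 'D') = true
instance (trek : String) : Decidable (Pre_count_valleys trek) := by unfold Pre_count_valleys; infer_instance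
def pvWitness_count_valleys : String := "UDDDUUDUU"

def Spec_count_valleys (trek : String) (out : Int) : Prop := out = count_valleys_alt trek
instance (trek : String) (out : Int) : Decidable (Spec_count_valleys trek out) := by unfold Spec_count_valleys; infer_instance

-- ===== CLAIM (what is proved, stated in full; the proofs are below) =====
def Claim_equal_count_valleys : Prop := ∀ (trek : String), Dom_count_valleys trek → Pre_count_valleys trek → Spec_count_valleys trek (count_valleys trek)

-- ===== LEMMAS AND PROOFS =====

-- the altitude profile, recursively (proof-side characterisation of B's first pass)
def pvProf : List Char → Int → List Int
  | [], _ => []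
  | c :: cs, lv =>
      let lv' := lv + (if c = 'U' then 1 else -1)
      lv' :: pvProf cs lv'

lemma pvProfile_fold (l : List Char) (acc : List Int) (lv : Int) :
    (l.foldl (fun (acc : List Int × Int) step =>
        let lv := acc.2 + (if step = 'U' then 1 else -1)
        (acc.1 ++ [lv], lv)) (acc, lv)).1 = acc ++ pvProf l lv := by
  induction l generalizing acc lv with
  | nil => simp [pvProf]
  | cons c cs ih => simp [pvProf, List.foldl_cons, ih]

lemma pvFilt_cons (p : Int × Int) (l : List (Int × Int)) :
    ((List.filter (fun p => p.1 == (-1 : Int) && p.2 == (0 : Int)) (p :: l)).length : Int)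
      = (if p.1 = -1 ∧ p.2 = 0 then 1 else 0)
        + ((List.filter (fun p => p.1 == (-1 : Int) && p.2 == (0 : Int)) l).length : Int) := by
  rw [List.filter_cons]
  split_ifs with h1 h2 h2 <;> (simp_all; try ring)

lemma pvA_fold_eq (l : List Char) (lv c : Int) :
    (l.foldl pvStepA (lv, c)).2
      = c + (((lv :: pvProf l lv).zip (pvProf l lv)).filter
              (fun p => p.1 == (-1 : Int) && p.2 == (0 : Int))).length := by
  induction l generalizing lv c with
  | nil => simp [pvProf]
  | cons s ss ih =>
    rw [List.foldl_cons]
    by_cases hU : s = 'U'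
    · subst hU
      have hs : pvStepA (lv, c) 'U' = (lv + 1, if lv + 1 = 0 then c + 1 else c) := by
        simp [pvStepA]
      rw [hs, ih]
      simp [pvProf, pvFilt_cons]
      split_ifs <;> omega
    · have hs : pvStepA (lv, c) s = (lv - 1, c) := by simp [pvStepA, hU]
      rw [hs, ih]
      simp [pvProf, pvFilt_cons, hU, sub_eq_add_neg]
      omega

-- ===== VERDICT (by name: the statement is the Claim_ definition above) =====
theorem count_valleys_spec : Claim_equal_count_valleys := by
  intro trek _ _
  unfold Spec_count_valleys count_valleys count_valleys_alt
  rw [pvA_fold_eq, pvProfile_fold]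
  simp
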